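-- pv_equiv track=rewrite | github.com/gamersumit/MCP-github-issue-resolver | ghia/integrations/gh_cli.py | _split_account_blocks
-- ===== SOURCE A (Python) =====
-- def _split_account_blocks(text: str) -> list[str]:
--     """Split gh auth status text into per-account chunks.
--
--     A "block" starts at a "Logged in to" line and runs until the next
--     one (or end-of-text).  This is the cleanest way to associate
--     "Active account: true" with the right login when multiple accounts
--     appear under a single hostname header.
--     """
--
--     lines = text.splitlines()
--     blocks: list[list[str]] = []
--     current: list[str] = []
--     for line in lines:
--         if "Logged in to" in line:
--             if current:
--                 blocks.append(current)
--             current = [line]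
--         elif current:
--             current.append(line)
--     if current:
--         blocks.append(current)
--     return ["\n".join(b) for b in blocks]
-- ===== SOURCE B (Python) =====
-- def _split_account_blocks(text: str) -> list[str]:
--     """Reverse single pass: walk the lines back-to-front, collecting a tail of
--     lines; each "Logged in to" marker closes a block.  Lines before the first
--     marker are left in the tail and discarded; the collected blocks are
--     reversed at the end."""
--     blocks: list[str] = []
--     tail: list[str] = []
--     for line in reversed(text.splitlines()):
--         tail.append(line)
--         if "Logged in to" in line:
--             blocks.append("\n".join(reversed(tail)))
--             tail = []
--     blocks.reverse()
--     return blocks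
-- ===== Notes on version B (the rewrite author's own statement) =====
-- stated objective: alternative
-- what changed: Replaces the forward state machine (blocks/current with a conditional flush and an 'elif current' branch) by a reverse traversal that builds the output back-to-front: each marker line closes the collected tail into a block, and lines before the first marker are discarded for free.
import Mathlib
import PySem

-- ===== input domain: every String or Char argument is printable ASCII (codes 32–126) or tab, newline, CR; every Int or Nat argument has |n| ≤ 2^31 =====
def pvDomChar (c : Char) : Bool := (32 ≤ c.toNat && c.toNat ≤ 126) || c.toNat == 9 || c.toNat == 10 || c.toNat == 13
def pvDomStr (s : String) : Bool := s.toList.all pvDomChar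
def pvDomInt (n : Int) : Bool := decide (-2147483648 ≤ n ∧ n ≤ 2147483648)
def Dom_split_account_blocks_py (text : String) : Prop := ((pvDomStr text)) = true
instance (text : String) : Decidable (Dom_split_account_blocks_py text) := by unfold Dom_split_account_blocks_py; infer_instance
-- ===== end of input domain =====

-- B replaces A's forward blocks/current state machine by a reverse single pass that
-- builds the output back-to-front (objective: alternative, same O(n) cost).

-- ===== PORT A =====
-- "Logged in to" in line
def pvHasMarker (line : String) : Bool := PySem.Str.isIn "Logged in to" line

-- loop body of A: state = (blocks, current)
def pvStepA (st : List (List String) × List String) (line : String) :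
    List (List String) × List String :=
  if pvHasMarker line then
    ((if st.2 ≠ [] then st.1 ++ [st.2] else st.1), [line])
  else if st.2 ≠ [] then (st.1, st.2 ++ [line])
  else st

def split_account_blocks_py (text : String) : List String :=
  let lines := PySem.Str.splitlines text
  let st := lines.foldl pvStepA ([], [])
  let blocks := if st.2 ≠ [] then st.1 ++ [st.2] else st.1
  blocks.map (fun b => PySem.Str.join "\n" b)

-- ===== PORT B =====
-- loop body of B: state = (blocks, tail); tail.append(line) then flush on a marker
def pvStepB (st : List String × List String) (line : String) :
    List String × List String :=
  let tail := st.2 ++ [line]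
  if pvHasMarker line then (st.1 ++ [PySem.Str.join "\n" tail.reverse], [])
  else (st.1, tail)

def split_account_blocks_py_alt (text : String) : List String :=
  let st := (PySem.Str.splitlines text).reverse.foldl pvStepB ([], [])
  st.1.reverse

-- ===== PRECONDITION & SPEC =====
def Spec_split_account_blocks_py (text : String) (out : List String) : Prop := out = split_account_blocks_py_alt text
instance (text : String) (out : List String) : Decidable (Spec_split_account_blocks_py text out) := by unfold Spec_split_account_blocks_py; infer_instance

-- ===== CLAIM (what is proved, stated in full; the proofs are below) =====
def Claim_equal_split_account_blocks_py : Prop := ∀ (text : String), Dom_split_account_blocks_py text → Spec_split_account_blocks_py text (split_account_blocks_py text)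

-- ===== LEMMAS AND PROOFS =====

-- reference grouping: the list of raw (unjoined) blocks
def pvRawBlocks : List String → List (List String)
  | [] => []
  | x :: xs =>
    if pvHasMarker x then
      (x :: xs.takeWhile (fun l => !pvHasMarker l)) ::
        pvRawBlocks (xs.dropWhile (fun l => !pvHasMarker l))
    else pvRawBlocks xs
termination_by ls => ls.length
decreasing_by
  · have := List.length_dropWhile_le (fun l => !pvHasMarker l) xs
    simp; omega
  · simp

theorem pvRawBlocks_cons_pos (x : String) (xs : List String) (hm : pvHasMarker x = true) :
    pvRawBlocks (x :: xs) =
      (x :: xs.takeWhile (fun l => !pvHasMarker l)) ::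
        pvRawBlocks (xs.dropWhile (fun l => !pvHasMarker l)) := by
  rw [pvRawBlocks.eq_def]; simp [hm]

theorem pvRawBlocks_cons_neg (x : String) (xs : List String) (hm : ¬ pvHasMarker x = true) :
    pvRawBlocks (x :: xs) = pvRawBlocks xs := by
  rw [pvRawBlocks.eq_def]; simp [hm]

theorem pvRawBlocks_dropWhile (ls : List String) :
    pvRawBlocks (ls.dropWhile (fun l => !pvHasMarker l)) = pvRawBlocks ls := by
  induction ls with
  | nil => rfl
  | cons x xs ih =>
    by_cases hm : pvHasMarker x
    · simp [hm]
    · rw [List.dropWhile_cons]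
      simp only [hm, Bool.not_false, if_pos]
      rw [ih, pvRawBlocks_cons_neg x xs hm]

theorem pvFoldA_ne (ls : List String) : ∀ (blocks : List (List String)) (cur : List String),
    cur ≠ [] →
    (let st := ls.foldl pvStepA (blocks, cur)
     if st.2 ≠ [] then st.1 ++ [st.2] else st.1) =
    blocks ++ ((cur ++ ls.takeWhile (fun l => !pvHasMarker l)) ::
      pvRawBlocks (ls.dropWhile (fun l => !pvHasMarker l))) := by
  induction ls with
  | nil => intro blocks cur hc; simp [hc, pvRawBlocks]
  | cons x xs ih =>
    intro blocks cur hc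
    by_cases hm : pvHasMarker x
    · have hstep : pvStepA (blocks, cur) x = (blocks ++ [cur], [x]) := by
        simp [pvStepA, hm, hc]
      simp only [List.foldl_cons]
      rw [hstep, ih (blocks ++ [cur]) [x] (by simp)]
      rw [List.takeWhile_cons, List.dropWhile_cons]
      simp only [hm, Bool.not_true, Bool.false_eq_true, if_neg, not_false_iff]
      rw [pvRawBlocks_cons_pos x xs hm]
      simp
    · have hstep : pvStepA (blocks, cur) x = (blocks, cur ++ [x]) := by
        simp [pvStepA, hm, hc]
      simp only [List.foldl_cons]
      rw [hstep, ih blocks (cur ++ [x]) (by simp)]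
      rw [List.takeWhile_cons, List.dropWhile_cons]
      simp [hm]

theorem pvFoldA_nil (ls : List String) : ∀ (blocks : List (List String)),
    (let st := ls.foldl pvStepA (blocks, [])
     if st.2 ≠ [] then st.1 ++ [st.2] else st.1) = blocks ++ pvRawBlocks ls := by
  induction ls with
  | nil => intro blocks; simp [pvRawBlocks]
  | cons x xs ih =>
    intro blocks
    by_cases hm : pvHasMarker x
    · have hstep : pvStepA (blocks, []) x = (blocks, [x]) := by
        simp [pvStepA, hm]
      simp only [List.foldl_cons]
      rw [hstep]
      have h2 := pvFoldA_ne xs blocks [x] (by simp)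
      simp only at h2 ⊢
      rw [h2, pvRawBlocks_cons_pos x xs hm]
      simp
    · have hstep : pvStepA (blocks, []) x = (blocks, []) := by
        simp [pvStepA, hm]
      simp only [List.foldl_cons]
      rw [hstep]
      have h2 := ih blocks
      simp only at h2 ⊢
      rw [h2, pvRawBlocks_cons_neg x xs hm]

theorem pvFoldB (ls : List String) :
    ls.foldr (fun x st => pvStepB st x) ([], []) =
      (((pvRawBlocks ls).map (PySem.Str.join "\n")).reverse,
       (ls.takeWhile (fun l => !pvHasMarker l)).reverse) := by
  induction ls with
  | nil => simp [pvRawBlocks]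
  | cons x xs ih =>
    rw [List.foldr_cons, ih]
    by_cases hm : pvHasMarker x
    · simp only [pvStepB, hm, if_pos]
      rw [pvRawBlocks_cons_pos x xs hm]
      simp [hm, pvRawBlocks_dropWhile]
    · simp only [pvStepB, hm, Bool.false_eq_true]
      rw [pvRawBlocks_cons_neg x xs hm]
      simp [hm]

-- ===== VERDICT (by name: the statement is the Claim_ definition above) =====
theorem split_account_blocks_py_spec : Claim_equal_split_account_blocks_py := by
  intro text _
  unfold Spec_split_account_blocks_py split_account_blocks_py split_account_blocks_py_alt
  rw [List.foldl_reverse, pvFoldB]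
  have := pvFoldA_nil (PySem.Str.splitlines text) []
  simp only at this ⊢
  rw [this]
  simp
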